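-- pv_equiv track=rewrite | github.com/Boostcamp-Recsys9/codingtest-practice | week14/윤성/14889.py | team_cal
-- ===== SOURCE A (Python) =====
-- def team_cal(array,graph):
--     result=0
--     for i in range(len(array)-1):
--         start=array[i]
--         for j in range(i+1,len(array)):
--             end=array[j]
--             result+=(graph[start][end]+graph[end][start])
--     return result
-- ===== SOURCE B (Python) =====
-- def team_cal(array, graph):
--     counts = {}
--     for x in array:
--         counts[x] = counts.get(x, 0) + 1
--     total = 0
--     for u, cu in counts.items():
--         for v, cv in counts.items():
--             if v != u:
--                 total += cu * cv * graph[u][v]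
--         if cu > 1:
--             total += cu * (cu - 1) * graph[u][u]
--     return total
-- ===== Notes on version B (the rewrite author's own statement) =====
-- stated objective: alternative
-- what changed: B aggregates by value instead of iterating index pairs: one pass builds a multiplicity counter over array, then it sums cu*cv*graph[u][v] over ordered pairs of distinct VALUES plus cu*(cu-1)*graph[u][u] per repeated value, replacing A's triangular loop over index pairs that adds the two symmetric weights per pair.
import Mathlib
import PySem

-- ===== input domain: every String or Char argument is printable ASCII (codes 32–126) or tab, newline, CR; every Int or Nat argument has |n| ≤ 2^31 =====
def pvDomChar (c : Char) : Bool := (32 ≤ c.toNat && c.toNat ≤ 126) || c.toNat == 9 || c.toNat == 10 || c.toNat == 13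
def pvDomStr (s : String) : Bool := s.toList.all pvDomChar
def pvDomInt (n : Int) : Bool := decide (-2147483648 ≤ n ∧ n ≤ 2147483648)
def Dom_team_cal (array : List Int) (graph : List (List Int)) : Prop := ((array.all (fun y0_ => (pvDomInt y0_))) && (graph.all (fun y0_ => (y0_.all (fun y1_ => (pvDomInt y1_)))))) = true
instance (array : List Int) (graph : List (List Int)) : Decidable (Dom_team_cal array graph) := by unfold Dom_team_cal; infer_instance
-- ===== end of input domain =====

-- B replaces A's triangular index-pair loop by value aggregation: it builds a multiplicity
-- counter over array in one pass, then sums cu*cv*graph[u][v] over ordered pairs of distinct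
-- values plus cu*(cu-1)*graph[u][u] per repeated value (objective: alternative).

-- ===== PORT A =====
def team_cal (array : List Int) (graph : List (List Int)) : Int :=
  (PySem.List.pyRange 0 ((array.length : Int) - 1) 1).foldl (fun result i =>
    let start := PySem.List.pyGetD array i 0
    (PySem.List.pyRange (i + 1) (array.length : Int) 1).foldl (fun result j =>
      let «end» := PySem.List.pyGetD array j 0
      result + (PySem.List.pyGetD (PySem.List.pyGetD graph start []) «end» 0
              + PySem.List.pyGetD (PySem.List.pyGetD graph «end» []) start 0)) result) 0

-- ===== PORT B =====
def team_cal_alt (array : List Int) (graph : List (List Int)) : Int :=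
  let counts : PySem.Dict Int Int :=
    array.foldl (fun counts x => counts.insert x (counts.getD x 0 + 1)) PySem.Dict.empty
  counts.items.foldl (fun total p =>
    let total := counts.items.foldl (fun total q =>
      if q.1 ≠ p.1 then
        total + p.2 * q.2 * PySem.List.pyGetD (PySem.List.pyGetD graph p.1 []) q.1 0
      else total) total
    if 1 < p.2 then
      total + p.2 * (p.2 - 1) * PySem.List.pyGetD (PySem.List.pyGetD graph p.1 []) p.1 0
    else total) 0

-- ===== PRECONDITION & SPEC =====
-- Pre_ excludes exactly the inputs on which Python A raises an IndexError:
-- some graph lookup graph[array[i]][array[j]] (distinct positions i ≠ j) is out of range.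
def Pre_team_cal (array : List Int) (graph : List (List Int)) : Prop :=
  ∀ i ∈ List.range array.length, ∀ j ∈ List.range array.length, i ≠ j →
    PySem.Raise.InRange graph.length (array.getD i 0) ∧
    PySem.Raise.InRange (PySem.List.pyGetD graph (array.getD i 0) []).length (array.getD j 0)
instance (array : List Int) (graph : List (List Int)) : Decidable (Pre_team_cal array graph) := by unfold Pre_team_cal; infer_instance

def pvWitness_team_cal : List Int × List (List Int) := ([0, 1], [[0, 3], [5, 0]])

def Spec_team_cal (array : List Int) (graph : List (List Int)) (out : Int) : Prop := out = team_cal_alt array graph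
instance (array : List Int) (graph : List (List Int)) (out : Int) : Decidable (Spec_team_cal array graph out) := by unfold Spec_team_cal; infer_instance

-- ===== CLAIM (what is proved, stated in full; the proofs are below) =====
def Claim_equal_team_cal : Prop := ∀ (array : List Int) (graph : List (List Int)), Dom_team_cal array graph → Pre_team_cal array graph → Spec_team_cal array graph (team_cal array graph)

-- ===== LEMMAS AND PROOFS =====

-- a double loop that only accumulates turns into a double sum
theorem pv_foldl_foldl_add (l : List Int) (inner : Int → List Int) (g : Int → Int → Int)
    (init : Int) :
    l.foldl (fun acc i => (inner i).foldl (fun a j => a + g i j) acc) init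
      = init + (l.map (fun i => ((inner i).map (g i)).sum)).sum := by
  induction l generalizing init with
  | nil => simp
  | cons x xs ih =>
    simp only [List.foldl_cons, List.map_cons, List.sum_cons,
      PySem.List.foldl_add]
    ring

-- a fold that conditionally accumulates is a sum of guarded terms
theorem pv_foldl_if_add {β : Type} (l : List β) (c : β → Prop) [DecidablePred c]
    (f : β → Int) (init : Int) :
    l.foldl (fun a x => if c x then a + f x else a) init
      = init + (l.map (fun x => if c x then f x else 0)).sum := by
  have hbody : (fun (a : Int) (x : β) => if c x then a + f x else a)
      = fun a x => a + (if c x then f x else 0) := by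
    funext a x; by_cases h : c x <;> simp [h]
  rw [hbody, PySem.List.foldl_add]

-- summing a function that is zeroed everywhere except at one member of a nodup list
theorem pv_sum_ite_eq (S : List Int) (u : Int) (f : Int → Int)
    (hn : S.Nodup) (hu : u ∈ S) :
    (S.map (fun v => if v = u then f v else 0)).sum = f u := by
  induction S with
  | nil => cases hu
  | cons x xs ih =>
    rcases List.mem_cons.mp hu with h | h
    · subst h
      have hx : u ∉ xs := (List.nodup_cons.mp hn).1
      have hz : (xs.map (fun v => if v = u then f v else 0)).sum = 0 := by
        apply List.sum_eq_zero
        intro y hy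
        rcases List.mem_map.mp hy with ⟨v, hv, rfl⟩
        have : v ≠ u := fun h => hx (h ▸ hv)
        simp [this]
      simp [hz]
    · have hx : x ≠ u := by
        rintro rfl; exact (List.nodup_cons.mp hn).1 h
      simp only [List.map_cons, List.sum_cons, if_neg hx, zero_add]
      exact ih (List.nodup_cons.mp hn).2 h

-- dropping one member of a nodup list from a sum
theorem pv_sum_ite_ne (S : List Int) (u : Int) (f : Int → Int)
    (hn : S.Nodup) (hu : u ∈ S) :
    (S.map (fun v => if v ≠ u then f v else 0)).sum = (S.map f).sum - f u := by
  have hsplit : (S.map f).sum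
      = (S.map (fun v => if v ≠ u then f v else 0)).sum
        + (S.map (fun v => if v = u then f v else 0)).sum := by
    rw [← PySem.List.sum_map_add_int]
    apply congrArg
    apply List.map_congr_left
    intro v _
    by_cases h : v = u <;> simp [h]
  rw [pv_sum_ite_eq S u f hn hu] at hsplit
  omega

-- grouping a sum over array by its distinct values with multiplicities
theorem pv_group_sum (S arr : List Int) (g : Int → Int)
    (hn : S.Nodup) (hcov : ∀ x ∈ arr, x ∈ S) :
    (S.map (fun v => (arr.count v : Int) * g v)).sum = (arr.map g).sum := by
  induction arr with
  | nil => simp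
  | cons x xs ih =>
    have hcov' : ∀ y ∈ xs, y ∈ S := fun y hy => hcov y (List.mem_cons_of_mem x hy)
    have hstep : (fun v => (((x :: xs).count v : Int)) * g v)
        = fun v => (xs.count v : Int) * g v + (if v = x then g v else 0) := by
      funext v
      rw [List.count_cons]
      push_cast
      simp only [beq_iff_eq]
      by_cases h : v = x
      · rw [if_pos h.symm, if_pos h]; ring
      · rw [if_neg (fun hh => h hh.symm), if_neg h]; ring
    rw [hstep]
    rw [PySem.List.sum_map_add_int]
    rw [ih hcov', pv_sum_ite_eq S x g hn (hcov x (List.mem_cons_self))]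
    simp only [List.map_cons, List.sum_cons]
    ring

-- the grid-minus-diagonal value of the input, the common normal form of both programs
def pvE (array : List Int) (graph : List (List Int)) : Int :=
  (array.map (fun u =>
    (array.map (fun v => PySem.List.pyGetD (PySem.List.pyGetD graph u []) v 0)).sum
      - PySem.List.pyGetD (PySem.List.pyGetD graph u []) u 0)).sum

-- the core identity for A: triangle with symmetric terms = full grid minus the diagonal
theorem pv_tri_eq_grid (T : Int → Int → Int) (n : ℕ) :
    ((PySem.List.pyRange 0 (n : Int) 1).map (fun i =>
        ((PySem.List.pyRange (i + 1) (n : Int) 1).map (fun j => T i j + T j i)).sum)).sum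
      = ((PySem.List.pyRange 0 (n : Int) 1).map (fun i =>
        ((PySem.List.pyRange 0 (n : Int) 1).map (fun j => if i = j then 0 else T i j)).sum)).sum := by
  induction n with
  | zero => simp [PySem.List.pyRange_one_eq_nil]
  | succ n ih =>
    have hn : ((n : Int) + 1) = ((n + 1 : ℕ) : Int) := by push_cast; ring
    have hsucc : PySem.List.pyRange 0 ((n + 1 : ℕ) : Int) 1
        = PySem.List.pyRange 0 (n : Int) 1 ++ [(n : Int)] := by
      rw [← hn, PySem.List.pyRange_one_succ_right (by exact_mod_cast Nat.zero_le n)]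
    have hmemlt : ∀ i ∈ PySem.List.pyRange 0 (n : Int) 1, i < (n : Int) := by
      intro i hi
      exact (PySem.List.mem_pyRange_one.mp hi).2
    rw [hsucc]
    simp only [List.map_append, List.map_cons, List.map_nil, List.sum_append, List.sum_cons,
      List.sum_nil]
    have hempty : PySem.List.pyRange ((n : Int) + 1) ((n + 1 : ℕ) : Int) 1 = [] := by
      rw [← hn]; exact PySem.List.pyRange_one_eq_nil (le_refl _)
    rw [hempty]
    have hL : (PySem.List.pyRange 0 (n : Int) 1).map (fun i =>
          ((PySem.List.pyRange (i + 1) ((n + 1 : ℕ) : Int) 1).map (fun j => T i j + T j i)).sum)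
        = (PySem.List.pyRange 0 (n : Int) 1).map (fun i =>
          ((PySem.List.pyRange (i + 1) (n : Int) 1).map (fun j => T i j + T j i)).sum
            + (T i n + T n i)) := by
      apply List.map_congr_left
      intro i hi
      have hlt := hmemlt i hi
      rw [← hn, PySem.List.pyRange_one_succ_right (by omega)]
      simp
    have hA : (PySem.List.pyRange 0 (n : Int) 1).map
          (fun i => ((PySem.List.pyRange 0 (n : Int) 1).map (fun j => if i = j then 0 else T i j)).sum
            + ((if i = (n : Int) then 0 else T i (n : Int)) + 0))
        = (PySem.List.pyRange 0 (n : Int) 1).map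
          (fun i => ((PySem.List.pyRange 0 (n : Int) 1).map (fun j => if i = j then 0 else T i j)).sum
            + T i (n : Int)) := by
      apply List.map_congr_left; intro i hi
      have : ¬ (i = (n : Int)) := by have := hmemlt i hi; omega
      simp [this]
    have hB : (PySem.List.pyRange 0 (n : Int) 1).map (fun j => if (n : Int) = j then 0 else T (n : Int) j)
        = (PySem.List.pyRange 0 (n : Int) 1).map (fun j => T (n : Int) j) := by
      apply List.map_congr_left; intro j hj
      have : ¬ ((n : Int) = j) := by have := hmemlt j hj; omega
      simp [this]
    rw [hL, hA, hB]
    simp only [PySem.List.sum_map_add_int, List.map_nil, List.sum_nil, if_true, add_zero]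
    simp only [PySem.List.sum_map_add_int] at ih
    linarith [ih]

-- the outer range of A (to n-1) can be extended to n: the extra inner range is empty
theorem pv_outer_extend (T : Int → Int → Int) (n : ℕ) :
    ((PySem.List.pyRange 0 ((n : Int) - 1) 1).map (fun i =>
        ((PySem.List.pyRange (i + 1) (n : Int) 1).map (fun j => T i j + T j i)).sum)).sum
      = ((PySem.List.pyRange 0 (n : Int) 1).map (fun i =>
        ((PySem.List.pyRange (i + 1) (n : Int) 1).map (fun j => T i j + T j i)).sum)).sum := by
  cases n with
  | zero => simp [PySem.List.pyRange_one_eq_nil]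
  | succ m =>
    have h1 : ((((m : ℕ) + 1 : ℕ) : Int)) - 1 = (m : Int) := by push_cast; ring
    have h2 : PySem.List.pyRange 0 (((m + 1 : ℕ)) : Int) 1
        = PySem.List.pyRange 0 (m : Int) 1 ++ [(m : Int)] := by
      have : (((m + 1 : ℕ)) : Int) = (m : Int) + 1 := by push_cast; ring
      rw [this, PySem.List.pyRange_one_succ_right (by exact_mod_cast Nat.zero_le m)]
    rw [h1, h2]
    have hempty : PySem.List.pyRange ((m : Int) + 1) (((m + 1 : ℕ)) : Int) 1 = [] := by
      have : (((m + 1 : ℕ)) : Int) = (m : Int) + 1 := by push_cast; ring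
      rw [this]; exact PySem.List.pyRange_one_eq_nil (le_refl _)
    simp

-- A's fold equals the grid-minus-diagonal normal form
theorem pv_team_cal_eq_E (array : List Int) (graph : List (List Int)) :
    team_cal array graph = pvE array graph := by
  unfold team_cal pvE
  set T : Int → Int → Int := fun u v =>
    PySem.List.pyGetD (PySem.List.pyGetD graph u []) v 0 with hT
  set n : ℕ := array.length with hnn
  show (PySem.List.pyRange 0 ((n : Int) - 1) 1).foldl
      (fun result i => (PySem.List.pyRange (i + 1) (n : Int) 1).foldl
        (fun result j => result +
          (T (PySem.List.pyGetD array i 0) (PySem.List.pyGetD array j 0)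
            + T (PySem.List.pyGetD array j 0) (PySem.List.pyGetD array i 0))) result) 0
    = (array.map (fun u => (array.map (T u)).sum - T u u)).sum
  set T' : Int → Int → Int := fun i j =>
    T (PySem.List.pyGetD array i 0) (PySem.List.pyGetD array j 0) with hT'
  rw [pv_foldl_foldl_add, pv_outer_extend T' n, pv_tri_eq_grid T' n, zero_add]
  -- now: grid-if over indices = grid-minus-diagonal over values
  have hinner : (PySem.List.pyRange 0 (n : Int) 1).map (fun i =>
        ((PySem.List.pyRange 0 (n : Int) 1).map (fun j => if i = j then 0 else T' i j)).sum)
      = (PySem.List.pyRange 0 (n : Int) 1).map (fun i =>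
        (array.map (T (PySem.List.pyGetD array i 0))).sum
          - T' i i) := by
    apply List.map_congr_left
    intro i hi
    have hflip : (fun j => if i = j then 0 else T' i j)
        = fun j => if j ≠ i then T' i j else 0 := by
      funext j; by_cases h : i = j <;> simp [h, Ne, eq_comm]
    rw [hflip, pv_sum_ite_ne _ i (T' i) (PySem.List.nodup_pyRange_one 0 (n : Int)) hi]
    have hmap : (PySem.List.pyRange 0 (n : Int) 1).map (T' i)
        = array.map (T (PySem.List.pyGetD array i 0)) := by
      have : (PySem.List.pyRange 0 (n : Int) 1).map (fun j => PySem.List.pyGetD array j 0)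
          = array := by
        rw [hnn]
        exact PySem.List.map_pyGetD_pyRange_zero array 0
      calc (PySem.List.pyRange 0 (n : Int) 1).map (T' i)
          = ((PySem.List.pyRange 0 (n : Int) 1).map (fun j => PySem.List.pyGetD array j 0)).map
              (T (PySem.List.pyGetD array i 0)) := by
            rw [List.map_map]; rfl
        _ = array.map (T (PySem.List.pyGetD array i 0)) := by rw [this]
    rw [hmap]
  rw [hinner]
  have houter : (PySem.List.pyRange 0 (n : Int) 1).map (fun i =>
        (array.map (T (PySem.List.pyGetD array i 0))).sum - T' i i)
      = ((PySem.List.pyRange 0 (n : Int) 1).map (fun i => PySem.List.pyGetD array i 0)).map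
          (fun u => (array.map (T u)).sum - T u u) := by
    rw [List.map_map]; rfl
  rw [houter]
  have : (PySem.List.pyRange 0 (n : Int) 1).map (fun i => PySem.List.pyGetD array i 0)
      = array := by
    rw [hnn]
    exact PySem.List.map_pyGetD_pyRange_zero array 0
  rw [this]

-- B's counter fold equals the grid-minus-diagonal normal form
theorem pv_team_cal_alt_eq_E (array : List Int) (graph : List (List Int)) :
    team_cal_alt array graph = pvE array graph := by
  unfold team_cal_alt pvE
  dsimp only
  rw [PySem.Dict.foldl_insert_getD_add_one_eq_counter, PySem.Dict.items_counter]
  set T : Int → Int → Int := fun u v =>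
    PySem.List.pyGetD (PySem.List.pyGetD graph u []) v 0 with hT
  set S : List Int := PySem.Set.ofList array with hS
  have hnS : S.Nodup := PySem.Set.nodup_ofList array
  have hcov : ∀ x ∈ array, x ∈ S := fun x hx => (PySem.Set.mem_ofList array x).mpr hx
  set c : Int → Int := fun v => (array.count v : Int) with hc
  set L : List (Int × Int) := S.map (fun k => (k, c k)) with hL
  -- rewrite the outer body as a plain accumulation of one term per item
  have hbody : (fun (total : Int) (p : Int × Int) =>
      if 1 < p.2 then
        (L.foldl (fun total q =>
          if q.1 ≠ p.1 then total + p.2 * q.2 * T p.1 q.1 else total) total)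
          + p.2 * (p.2 - 1) * T p.1 p.1
      else
        L.foldl (fun total q =>
          if q.1 ≠ p.1 then total + p.2 * q.2 * T p.1 q.1 else total) total)
      = fun total p => total +
          ((L.map (fun q => if q.1 ≠ p.1 then p.2 * q.2 * T p.1 q.1 else 0)).sum
            + (if 1 < p.2 then p.2 * (p.2 - 1) * T p.1 p.1 else 0)) := by
    funext total p
    rw [pv_foldl_if_add]
    by_cases h : 1 < p.2 <;> simp [h] <;> try ring
  rw [hbody, PySem.List.foldl_add, zero_add]
  -- per item: the term is c u * ((array.map (T u)).sum - T u u)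
  have hterm : L.map (fun p =>
        (L.map (fun q => if q.1 ≠ p.1 then p.2 * q.2 * T p.1 q.1 else 0)).sum
          + (if 1 < p.2 then p.2 * (p.2 - 1) * T p.1 p.1 else 0))
      = S.map (fun u => c u * ((array.map (T u)).sum - T u u)) := by
    rw [hL, List.map_map]
    apply List.map_congr_left
    intro u hu
    simp only [Function.comp]
    have hin : (S.map (fun k => ((k, c k) : Int × Int))).map
          (fun q => if q.1 ≠ u then c u * q.2 * T u q.1 else 0)
        = S.map (fun v => if v ≠ u then c v * (c u * T u v) else 0) := by
      rw [List.map_map]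
      apply List.map_congr_left
      intro v _
      by_cases h : v ≠ u <;> simp [h] <;> try ring
    rw [hin, pv_sum_ite_ne S u (fun v => c v * (c u * T u v)) hnS hu]
    rw [pv_group_sum S array (fun v => c u * T u v) hnS hcov]
    rw [List.sum_map_mul_left array (T u) (c u)]
    have hpos : (1 : Int) ≤ c u := by
      have : u ∈ array := (PySem.Set.mem_ofList array u).mp (hS ▸ hu)
      have := List.count_pos_iff.mpr this
      simp only [hc]; omega
    by_cases h : 1 < c u
    · simp only [if_pos h]; ring
    · have h1 : c u = 1 := by omega
      simp [h1]
  rw [hterm, pv_group_sum S array (fun u => (array.map (T u)).sum - T u u) hnS hcov]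

theorem pv_team_cal_eq (array : List Int) (graph : List (List Int)) :
    team_cal array graph = team_cal_alt array graph := by
  rw [pv_team_cal_eq_E, pv_team_cal_alt_eq_E]

-- ===== VERDICT (by name: the statement is the Claim_ definition above) =====
theorem team_cal_spec : Claim_equal_team_cal := by
  intro array graph _ _
  unfold Spec_team_cal
  exact pv_team_cal_eq array graph
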